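-- pv_equiv track=rewrite | github.com/GitHubarin/NoRainNoGain | pages/2_🌦️_Precipitation.py | interpret_precipitation_trend
-- ===== SOURCE A (Python) =====
-- def interpret_precipitation_trend(changes):
--     if all(x > 0 for x in changes):
--         return "There is a **consistent increasing trend** in precipitation over the selected period."
--     elif all(x < 0 for x in changes):
--         return "There is a **consistent decreasing trend** in precipitation over the selected period."
--     elif sum(changes) > 0:
--         return "The overall trend shows **increasing precipitation** despite some year-to-year fluctuations."
--     elif sum(changes) < 0:
--         return "The overall trend shows **decreasing precipitation** despite some year-to-year fluctuations."
--     else: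
--         return "Precipitation shows **no clear trend** with significant year-to-year variability."
-- ===== SOURCE B (Python) =====
-- def interpret_precipitation_trend(changes):
--     total = 0
--     all_pos = True
--     all_neg = True
--     for x in changes:
--         total += x
--         all_pos = all_pos and x > 0
--         all_neg = all_neg and x < 0
--     if all_pos:
--         return "There is a **consistent increasing trend** in precipitation over the selected period."
--     if all_neg:
--         return "There is a **consistent decreasing trend** in precipitation over the selected period."
--     if total > 0:
--         return "The overall trend shows **increasing precipitation** despite some year-to-year fluctuations."
--     if total < 0:
--         return "The overall trend shows **decreasing precipitation** despite some year-to-year fluctuations."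
--     return "Precipitation shows **no clear trend** with significant year-to-year variability."
-- ===== Notes on version B (the rewrite author's own statement) =====
-- stated objective: simpler
-- what changed: Replaces up to four separate traversals (two all() generators and two sum() calls) with a single loop that accumulates total, all_pos and all_neg at once, then branches in the same priority order.
import Mathlib
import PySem

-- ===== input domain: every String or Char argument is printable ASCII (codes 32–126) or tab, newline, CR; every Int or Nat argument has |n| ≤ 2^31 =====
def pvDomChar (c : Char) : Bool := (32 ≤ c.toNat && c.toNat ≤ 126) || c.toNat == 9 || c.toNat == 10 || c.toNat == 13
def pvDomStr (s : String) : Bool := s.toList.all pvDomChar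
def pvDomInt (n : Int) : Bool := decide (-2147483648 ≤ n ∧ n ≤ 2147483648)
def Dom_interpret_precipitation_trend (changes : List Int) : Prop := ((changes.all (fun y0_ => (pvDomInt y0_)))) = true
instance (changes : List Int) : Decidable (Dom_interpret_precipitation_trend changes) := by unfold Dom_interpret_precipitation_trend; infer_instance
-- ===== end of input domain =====

-- B merges A's four separate traversals (two all() scans and two sum() calls) into one
-- accumulator loop; same five strings, same branch priority (objective: simpler).

-- ===== PORT A =====
def interpret_precipitation_trend (changes : List Int) : String :=
  if changes.all (fun x => decide (x > 0)) then
    "There is a **consistent increasing trend** in precipitation over the selected period."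
  else if changes.all (fun x => decide (x < 0)) then
    "There is a **consistent decreasing trend** in precipitation over the selected period."
  else if changes.sum > 0 then
    "The overall trend shows **increasing precipitation** despite some year-to-year fluctuations."
  else if changes.sum < 0 then
    "The overall trend shows **decreasing precipitation** despite some year-to-year fluctuations."
  else
    "Precipitation shows **no clear trend** with significant year-to-year variability."

-- ===== PORT B =====
def interpret_precipitation_trend_alt (changes : List Int) : String :=
  let st := changes.foldl
    (fun (acc : Int × Bool × Bool) x =>
      (acc.1 + x, acc.2.1 && decide (x > 0), acc.2.2 && decide (x < 0)))
    (0, true, true)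
  if st.2.1 then
    "There is a **consistent increasing trend** in precipitation over the selected period."
  else if st.2.2 then
    "There is a **consistent decreasing trend** in precipitation over the selected period."
  else if st.1 > 0 then
    "The overall trend shows **increasing precipitation** despite some year-to-year fluctuations."
  else if st.1 < 0 then
    "The overall trend shows **decreasing precipitation** despite some year-to-year fluctuations."
  else
    "Precipitation shows **no clear trend** with significant year-to-year variability."

-- ===== PRECONDITION & SPEC =====
def Spec_interpret_precipitation_trend (changes : List Int) (out : String) : Prop := out = interpret_precipitation_trend_alt changes
instance (changes : List Int) (out : String) : Decidable (Spec_interpret_precipitation_trend changes out) := by unfold Spec_interpret_precipitation_trend; infer_instance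

-- ===== CLAIM (what is proved, stated in full; the proofs are below) =====
def Claim_equal_interpret_precipitation_trend : Prop := ∀ (changes : List Int), Dom_interpret_precipitation_trend changes → Spec_interpret_precipitation_trend changes (interpret_precipitation_trend changes)

-- ===== LEMMAS AND PROOFS =====

theorem pv_fold_state (l : List Int) (a : Int) (p n : Bool) :
    l.foldl (fun (acc : Int × Bool × Bool) x =>
      (acc.1 + x, acc.2.1 && decide (x > 0), acc.2.2 && decide (x < 0))) (a, p, n)
    = (a + l.sum, p && l.all (fun x => decide (x > 0)), n && l.all (fun x => decide (x < 0))) := by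
  induction l generalizing a p n with
  | nil => simp
  | cons h t ih =>
    simp [List.foldl, ih, List.all_cons, Bool.and_assoc]
    ring

-- ===== VERDICT (by name: the statement is the Claim_ definition above) =====
theorem interpret_precipitation_trend_spec : Claim_equal_interpret_precipitation_trend := by
  intro changes _
  unfold Spec_interpret_precipitation_trend interpret_precipitation_trend interpret_precipitation_trend_alt
  simp [pv_fold_state]
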